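-- pv_equiv track=rewrite | github.com/LautaroCenteno/int-prog | segundo bimestre/guia_integradora.py | stock_productos
-- ===== SOURCE A (Python) =====
-- def stock_productos(stock_cambios: list[tuple[str, int]]) -> dict[str, tuple[int, int]]:
--     res: dict[str, tuple[int, int]] = {}
--     for i in stock_cambios:
--         nombre = i[0]
--         cantidad = i[1]
--         if nombre not in res:
--             res[nombre] = (cantidad,cantidad)
--         else:
--             minimo = res[nombre][0]
--             maximo = res[nombre][1]
--             if cantidad > maximo:
--                 res[nombre] = (minimo, cantidad)
--             elif cantidad < res[i[0]][0]:
--                 res[nombre] = (cantidad, maximo)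
--     return res
-- ===== SOURCE B (Python) =====
-- def stock_productos(stock_cambios: list[tuple[str, int]]) -> dict[str, tuple[int, int]]:
--     grupos: dict[str, list[int]] = {}
--     for nombre, cantidad in stock_cambios:
--         grupos.setdefault(nombre, []).append(cantidad)
--     return {nombre: (min(vals), max(vals)) for nombre, vals in grupos.items()}
-- ===== Notes on version B (the rewrite author's own statement) =====
-- stated objective: simpler
-- what changed: Replaces the single loop that maintains running (min,max) pairs with case analysis by a group phase (dict of full value lists via setdefault) followed by a reduce phase computing min/max per group in a comprehension.
import Mathlib
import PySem

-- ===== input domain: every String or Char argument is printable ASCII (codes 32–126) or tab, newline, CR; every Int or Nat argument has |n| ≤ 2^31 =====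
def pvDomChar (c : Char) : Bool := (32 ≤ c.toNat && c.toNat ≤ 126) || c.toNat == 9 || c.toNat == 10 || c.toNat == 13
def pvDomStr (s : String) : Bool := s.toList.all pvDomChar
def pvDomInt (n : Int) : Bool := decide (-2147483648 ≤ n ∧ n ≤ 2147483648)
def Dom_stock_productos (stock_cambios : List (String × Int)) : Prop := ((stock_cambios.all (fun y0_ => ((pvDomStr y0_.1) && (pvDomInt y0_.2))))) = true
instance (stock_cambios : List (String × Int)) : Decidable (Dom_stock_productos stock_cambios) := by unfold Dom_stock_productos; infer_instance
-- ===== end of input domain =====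

-- B replaces A's running-(min,max) loop by a group-then-reduce decomposition (same cost, plainer); return-value equivalence.

-- ===== PORT A =====
-- one loop step of A: update the running (min, max) dict with one (nombre, cantidad) pair
def stockStepA (res : PySem.Dict String (Int × Int)) (i : String × Int) : PySem.Dict String (Int × Int) :=
  let nombre := i.1
  let cantidad := i.2
  if res.contains nombre = false then
    res.insert nombre (cantidad, cantidad)
  else
    match res.get? nombre with
    | none => res  -- unreachable: the else branch is guarded by 'nombre in res'
    | some mv =>
      let minimo := mv.1
      let maximo := mv.2
      if cantidad > maximo then
        res.insert nombre (minimo, cantidad)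
      else if cantidad < mv.1 then  -- res[i[0]][0] is the same stored pair's first component
        res.insert nombre (cantidad, maximo)
      else
        res

def stock_productos (stock_cambios : List (String × Int)) : List (String × Int × Int) :=
  (stock_cambios.foldl stockStepA PySem.Dict.empty).items

-- ===== PORT B =====
def stock_productos_alt (stock_cambios : List (String × Int)) : List (String × Int × Int) :=
  let grupos := stock_cambios.foldl
    (fun d p => d.modify p.1 [] (fun vs => vs ++ [p.2])) PySem.Dict.empty
  grupos.items.map (fun p =>
    (p.1, ((PySem.List.min? p.2 (fun x => x)).getD 0,
           (PySem.List.max? p.2 (fun x => x)).getD 0)))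
  -- the '.getD 0' defaults are unreachable: every group is nonempty

-- ===== PRECONDITION & SPEC =====
def Spec_stock_productos (stock_cambios : List (String × Int)) (out : List (String × Int × Int)) : Prop := out = stock_productos_alt stock_cambios
instance (stock_cambios : List (String × Int)) (out : List (String × Int × Int)) : Decidable (Spec_stock_productos stock_cambios out) := by unfold Spec_stock_productos; infer_instance

-- ===== CLAIM (what is proved, stated in full; the proofs are below) =====
def Claim_equal_stock_productos : Prop := ∀ (stock_cambios : List (String × Int)), Dom_stock_productos stock_cambios → Spec_stock_productos stock_cambios (stock_productos stock_cambios)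

-- ===== LEMMAS AND PROOFS =====

-- A's in-place combining step on a present key, as a pure function
def pvCombine (p : Int × Int) (c : Int) : Int × Int :=
  if c > p.2 then (p.1, c) else if c < p.1 then (c, p.2) else p

-- A's effect on one key, as a pure fold over the quantities seen for that key
def pvStep1 (o : Option (Int × Int)) (c : Int) : Option (Int × Int) :=
  match o with
  | none => some (c, c)
  | some p => some (pvCombine p c)

theorem pvFoldl_combine (t : List Int) : ∀ (m M : Int), m ≤ M →
    t.foldl pvCombine (m, M) = (t.foldl min m, t.foldl max M) := by
  induction t with
  | nil => intro m M _; rfl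
  | cons c t ih =>
    intro m M h
    simp only [List.foldl_cons]
    have : pvCombine (m, M) c = (min m c, max M c) := by
      simp only [pvCombine]
      split_ifs with h1 h2
      all_goals simp_all [Int.min_def, Int.max_def]
      all_goals omega
    rw [this]
    exact ih _ _ (by have := le_max_right M c; have := min_le_left m c; omega)

theorem pvGetA (l : List (String × Int)) : ∀ (d : PySem.Dict String (Int × Int)) (k : String),
    (l.foldl stockStepA d).get? k
      = ((l.filter (fun p => p.1 == k)).map (·.2)).foldl pvStep1 (d.get? k) := by
  induction l with
  | nil => intro d k; rfl
  | cons p l ih =>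
    intro d k
    obtain ⟨n, c⟩ := p
    simp only [List.foldl_cons]
    rw [ih]
    by_cases hk : n = k
    · subst hk
      simp only [List.filter_cons, beq_self_eq_true, if_pos, List.map_cons, List.foldl_cons]
      congr 1
      simp only [stockStepA]
      by_cases hc : d.contains n = false
      · rw [if_pos hc, PySem.Dict.get?_insert_self]
        have : d.get? n = none := by
          rw [PySem.Dict.get?_eq_none_iff_contains]; exact hc
        rw [this]; rfl
      · rw [if_neg hc]
        have hsome : (d.get? n).isSome := by
          rw [← PySem.Dict.contains_eq_isSome_get?]
          simpa using hc
        obtain ⟨mv, hmv⟩ := Option.isSome_iff_exists.mp hsome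
        rw [hmv]
        simp only [pvStep1, pvCombine]
        split_ifs with h1 h2
        · rw [PySem.Dict.get?_insert_self]
        · rw [PySem.Dict.get?_insert_self]
        · rw [hmv]
    · have hbeq : (n == k) = false := by simpa using hk
      simp only [List.filter_cons, hbeq]
      congr 1
      simp only [stockStepA]
      by_cases hc : d.contains n = false
      · rw [if_pos hc, PySem.Dict.get?_insert_of_ne _ _ (Ne.symm hk)]
      · rw [if_neg hc]
        cases hmv : d.get? n with
        | none => rfl
        | some mv =>
          dsimp only
          split_ifs <;> first | rw [PySem.Dict.get?_insert_of_ne _ _ (Ne.symm hk)] | rfl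

-- the two loops keep identical key lists (same keys, same first-appearance order)
theorem pvKeysEq (l : List (String × Int)) :
    ∀ (dA : PySem.Dict String (Int × Int)) (dB : PySem.Dict String (List Int)),
    dA.keys = dB.keys →
    (l.foldl stockStepA dA).keys
      = (l.foldl (fun d p => d.modify p.1 [] (fun vs => vs ++ [p.2])) dB).keys := by
  induction l with
  | nil => intro dA dB h; exact h
  | cons p l ih =>
    intro dA dB h
    obtain ⟨n, c⟩ := p
    simp only [List.foldl_cons]
    apply ih
    have hcc : dA.contains n = dB.contains n := by
      simp [PySem.Dict.contains_eq_decide_mem_keys, h]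
    simp only [stockStepA, PySem.Dict.keys_modify]
    by_cases hc : dA.contains n = false
    · rw [if_pos hc, PySem.Dict.keys_insert_of_not_contains dA _ hc,
          PySem.Dict.keys_insert_of_not_contains dB _ (hcc ▸ hc), h]
    · have hca : dA.contains n = true := by simpa using hc
      have hcb : dB.contains n = true := hcc ▸ hca
      rw [if_neg hc, PySem.Dict.keys_insert_of_contains dB _ hcb]
      cases hmv : dA.get? n with
      | none => exact h
      | some mv =>
        dsimp only
        split_ifs <;> simp [PySem.Dict.keys_insert_of_contains dA _ hca, h]

theorem pvFoldl_step1_some (t : List Int) :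
    ∀ p, t.foldl pvStep1 (some p) = some (t.foldl pvCombine p) := by
  induction t with
  | nil => intro p; rfl
  | cons c t ih => intro p; simp only [List.foldl_cons, pvStep1]; exact ih _

-- ===== VERDICT (by name: the statement is the Claim_ definition above) =====
theorem stock_productos_spec : Claim_equal_stock_productos := by
  intro xs _
  unfold Spec_stock_productos stock_productos stock_productos_alt
  dsimp only
  have hnodB : (xs.foldl (fun d p => d.modify p.1 [] (fun vs => vs ++ [p.2]))
      PySem.Dict.empty).keys.Nodup :=
    PySem.Dict.nodup_keys_foldl_modify_key xs (fun p => p.1) [] (fun _ p vs => vs ++ [p.2])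
      PySem.Dict.empty (by simp [PySem.Dict.keys_empty])
  have hkeys := pvKeysEq xs PySem.Dict.empty PySem.Dict.empty (by simp [PySem.Dict.keys_empty])
  have hnodA : (xs.foldl stockStepA PySem.Dict.empty).keys.Nodup := hkeys ▸ hnodB
  rw [PySem.Dict.items_eq_map_keys _ hnodA ((0 : Int), (0 : Int)),
      PySem.Dict.items_eq_map_keys _ hnodB [], hkeys, List.map_map]
  apply List.map_congr_left
  intro k hk
  have hval : (xs.foldl (fun d p => d.modify p.1 [] fun vs => vs ++ [p.2])
      PySem.Dict.empty).getD k [] = (xs.filter (fun p => p.1 == k)).map (·.2) := by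
    rw [PySem.Dict.getD_foldl_modify_append, PySem.Dict.getD_empty]; simp
  have hmem : k ∈ xs.map (fun p => p.1) := by
    rw [PySem.Dict.keys_foldl_modify_key xs (fun p => p.1) [] (fun _ p vs => vs ++ [p.2])
        PySem.Dict.empty] at hk
    rcases (PySem.Set.mem_update _ _ _).mp hk with h | h
    · simp [PySem.Dict.keys_empty] at h
    · exact h
  have hne : (xs.filter (fun p => p.1 == k)).map (·.2) ≠ [] := by
    obtain ⟨p, hp, hpk⟩ := List.mem_map.mp hmem
    simp only [ne_eq, List.map_eq_nil_iff, List.filter_eq_nil_iff]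
    intro hall
    exact hall p hp (by simp [hpk])
  have hgetA : (xs.foldl stockStepA PySem.Dict.empty).get? k
      = ((xs.filter (fun p => p.1 == k)).map (·.2)).foldl pvStep1 none := by
    rw [pvGetA, PySem.Dict.get?_empty]
  cases hvl : (xs.filter (fun p => p.1 == k)).map (·.2) with
  | nil => exact absurd hvl hne
  | cons v t =>
    have hA : (xs.foldl stockStepA PySem.Dict.empty).getD k ((0 : Int), (0 : Int))
        = (t.foldl min v, t.foldl max v) := by
      rw [PySem.Dict.getD_eq_get?_getD, hgetA, hvl, List.foldl_cons]
      show (t.foldl pvStep1 (some (v, v))).getD _ = _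
      rw [pvFoldl_step1_some, pvFoldl_combine t v v le_rfl]
      rfl
    simp only [Function.comp, hval, hvl, hA, PySem.List.min?_id_cons, PySem.List.max?_id_cons,
      Option.getD_some]
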